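-- pv_equiv track=rewrite | github.com/thetomatoaddict/TIL | Algorithm/코테의민족/220827/02_모의고사.py | solution
-- ===== SOURCE A (Python) =====
-- def solution(answers):
--     s1=[1, 2, 3, 4, 5]
--     s2=[2, 1, 2, 3, 2, 4, 2, 5]
--     s3=[3, 3, 1, 1, 2, 2, 4, 4, 5, 5]
--     score={1:0,2:0,3:0}
--     answer = []
--     for i in range(len(answers)):
--         s1.append(s1[i])
--         if answers[i] == s1[i]:
--             score[1]+=1
--     for i in range(len(answers)):
--         s2.append(s2[i])
--         if answers[i] == s2[i]:
--             score[2]+=1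
--     for i in range(len(answers)):
--         s3.append(s3[i])
--         if answers[i] == s3[i]:
--             score[3]+=1
--     score=sorted(score.items(),key=lambda x:x[1],reverse=True)
--     answer.append(score[0][0])
--     if score[0][1] == score[1][1]:
--         answer.append(score[1][0])
--     if score[0][1] == score[2][1]:
--         answer.append(score[2][0])
--
--     return answer
-- ===== SOURCE B (Python) =====
-- def solution(answers):
--     # Bucket the answers by position mod 40 (= lcm(5, 8, 10)) in one pass,
--     # then score each pattern from the 40 residue histograms without
--     # rescanning the answers.
--     buckets = [dict() for _ in range(40)]
--     for i, a in enumerate(answers):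
--         b = buckets[i % 40]
--         b[a] = b.get(a, 0) + 1
--     patterns = [[1, 2, 3, 4, 5],
--                 [2, 1, 2, 3, 2, 4, 2, 5],
--                 [3, 3, 1, 1, 2, 2, 4, 4, 5, 5]]
--     scores = [sum(buckets[r].get(p[r % len(p)], 0) for r in range(40))
--               for p in patterns]
--     best = max(scores)
--     return [k for k in (1, 2, 3) if scores[k - 1] == best]
-- ===== Notes on version B (the rewrite author's own statement) =====
-- stated objective: alternative
-- what changed: B makes one pass over the answers building 40 per-residue (position mod lcm(5,8,10)=40) histograms of answer values, then scores each pattern purely from those histograms by table lookup, and selects winners with max-then-filter over students 1,2,3 — instead of A's three passes that each extend a growing copy of the pattern while comparing, followed by a sort-descending-and-compare-ties tail.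
import Mathlib
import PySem

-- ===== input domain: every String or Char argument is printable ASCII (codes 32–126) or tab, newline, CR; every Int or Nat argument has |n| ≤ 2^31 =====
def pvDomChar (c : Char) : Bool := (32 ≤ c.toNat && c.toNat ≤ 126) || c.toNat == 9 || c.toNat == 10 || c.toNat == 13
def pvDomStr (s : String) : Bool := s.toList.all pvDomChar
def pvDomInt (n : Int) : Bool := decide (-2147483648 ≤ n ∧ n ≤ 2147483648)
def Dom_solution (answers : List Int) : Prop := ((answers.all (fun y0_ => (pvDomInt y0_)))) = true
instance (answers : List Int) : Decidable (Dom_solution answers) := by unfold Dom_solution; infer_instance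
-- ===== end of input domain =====

-- B replaces A's three pattern-extending scans of the answers by ONE pass that buckets the
-- answers into 40 per-residue (position mod lcm(5,8,10) = 40) value histograms, scores each
-- pattern from those histograms alone, and picks winners by max-then-filter instead of A's
-- sort-descending-and-compare-ties tail. (objective: alternative)

-- ===== PORT A =====
-- one pass of A's 'for i in range(len(answers)): sK.append(sK[i]); if answers[i] == sK[i]: score[K] += 1'
def solStep (answers : List Int) (k : Int)
    (st : List Int × PySem.Dict Int Int) (i : Int) : List Int × PySem.Dict Int Int :=
  let s := st.1 ++ [PySem.List.pyGetD st.1 i 0]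
  if PySem.List.pyGetD answers i 0 = PySem.List.pyGetD s i 0
  then (s, st.2.modify k 0 (· + 1)) else (s, st.2)

def solution (answers : List Int) : List Int :=
  let r := PySem.List.pyRange 0 (answers.length : Int) 1
  let st1 := r.foldl (solStep answers 1) ([1, 2, 3, 4, 5], PySem.Dict.ofList [(1, 0), (2, 0), (3, 0)])
  let st2 := r.foldl (solStep answers 2) ([2, 1, 2, 3, 2, 4, 2, 5], st1.2)
  let st3 := r.foldl (solStep answers 3) ([3, 3, 1, 1, 2, 2, 4, 4, 5, 5], st2.2)
  let score := PySem.List.sorted st3.2.items (fun x => x.2) true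
  let answer : List Int := [(PySem.List.pyGetD score 0 (0, 0)).1]
  let answer := if (PySem.List.pyGetD score 0 (0, 0)).2 = (PySem.List.pyGetD score 1 (0, 0)).2
                then answer ++ [(PySem.List.pyGetD score 1 (0, 0)).1] else answer
  let answer := if (PySem.List.pyGetD score 0 (0, 0)).2 = (PySem.List.pyGetD score 2 (0, 0)).2
                then answer ++ [(PySem.List.pyGetD score 2 (0, 0)).1] else answer
  answer

-- ===== PORT B =====
-- B's loop body 'b = buckets[i % 40]; b[a] = b.get(a, 0) + 1' (in-place update of one bucket;
-- i comes from enumerate so i ≥ 0 and i % 40 is the exact Nat index, .toNat is lossless here)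
def bump (bs : List (PySem.Dict Int Int)) (ia : Int × Int) : List (PySem.Dict Int Int) :=
  let r := (PySem.Int.mod ia.1 40).toNat
  bs.set r ((bs.getD r PySem.Dict.empty).modify ia.2 0 (· + 1))

def solution_alt (answers : List Int) : List Int :=
  let buckets := (PySem.List.enumerate answers).foldl bump
      (List.replicate 40 (PySem.Dict.empty : PySem.Dict Int Int))
  let patterns : List (List Int) :=
    [[1, 2, 3, 4, 5], [2, 1, 2, 3, 2, 4, 2, 5], [3, 3, 1, 1, 2, 2, 4, 4, 5, 5]]
  let scores := patterns.map (fun p =>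
    (PySem.List.pyRange 0 40 1).foldl
      (fun s r => s + (PySem.List.pyGetD buckets r PySem.Dict.empty).getD
          (PySem.List.pyGetD p (PySem.Int.mod r (p.length : Int)) 0) 0) (0 : Int))
  let best := (PySem.List.max? scores (fun x => x)).getD 0   -- scores has three elements, so max? is never none
  ([1, 2, 3] : List Int).filter (fun k => PySem.List.pyGetD scores (k - 1) 0 = best)

-- ===== PRECONDITION & SPEC =====
def Spec_solution (answers : List Int) (out : List Int) : Prop := out = solution_alt answers
instance (answers : List Int) (out : List Int) : Decidable (Spec_solution answers out) := by unfold Spec_solution; infer_instance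

-- ===== CLAIM (what is proved, stated in full; the proofs are below) =====
def Claim_equal_solution : Prop := ∀ (answers : List Int), Dom_solution answers → Spec_solution answers (solution answers)

-- ===== LEMMAS AND PROOFS =====

-- A's reverse-sorted score.items() on a three-entry dict, written out by case analysis.
theorem sorted3 (c1 c2 c3 : Int) :
  PySem.List.sorted [((1:Int), c1), (2, c2), (3, c3)] (fun x => x.2) true =
  (if c1 < c2 then
    if c2 < c3 then [(3,c3),(2,c2),(1,c1)]
    else if c1 < c3 then [(2,c2),(3,c3),(1,c1)] else [(2,c2),(1,c1),(3,c3)]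
  else
    if c1 < c3 then [(3,c3),(1,c1),(2,c2)]
    else if c2 < c3 then [(1,c1),(3,c3),(2,c2)] else [(1,c1),(2,c2),(3,c3)]) := by
  simp only [PySem.List.sorted_rev_eq_foldl_insertBy, List.foldl, PySem.List.insertBy, decide_eq_true_eq]
  split_ifs <;> simp [PySem.List.insertBy, *]

theorem get3_0 (a b c d : Int × Int) : PySem.List.pyGetD [a,b,c] 0 d = a := rfl
theorem get3_1 (a b c d : Int × Int) : PySem.List.pyGetD [a,b,c] 1 d = b := rfl
theorem get3_2 (a b c d : Int × Int) : PySem.List.pyGetD [a,b,c] 2 d = c := rfl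

theorem filter3 (c1 c2 c3 M : Int) :
  ([1,2,3] : List Int).filter (fun k => PySem.List.pyGetD [c1,c2,c3] (k - 1) 0 = M)
  = (if c1 = M then [1] else []) ++ (if c2 = M then [2] else []) ++ (if c3 = M then [3] else []) := by
  have e1 : PySem.List.pyGetD [c1,c2,c3] ((1:Int) - 1) 0 = c1 := rfl
  have e2 : PySem.List.pyGetD [c1,c2,c3] ((2:Int) - 1) 0 = c2 := rfl
  have e3 : PySem.List.pyGetD [c1,c2,c3] ((3:Int) - 1) 0 = c3 := rfl
  simp only [List.filter_cons, List.filter_nil, e1, e2, e3]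
  by_cases h1 : c1 = M <;> by_cases h2 : c2 = M <;> by_cases h3 : c3 = M <;> simp [h1, h2, h3]

-- A's tail (sort the three (student, score) pairs by score descending, emit the head and ties)
-- equals B's tail (max of the three scores, filter students 1,2,3), for arbitrary scores.
set_option maxHeartbeats 2000000 in
theorem tail_eq (c1 c2 c3 : Int) :
  (let score := PySem.List.sorted [((1:Int), c1), (2, c2), (3, c3)] (fun x => x.2) true
   let a0 : List Int := [(PySem.List.pyGetD score 0 ((0:Int),(0:Int))).1]
   let a1 := if (PySem.List.pyGetD score 0 ((0:Int),(0:Int))).2 = (PySem.List.pyGetD score 1 ((0:Int),(0:Int))).2 then a0 ++ [(PySem.List.pyGetD score 1 ((0:Int),(0:Int))).1] else a0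
   if (PySem.List.pyGetD score 0 ((0:Int),(0:Int))).2 = (PySem.List.pyGetD score 2 ((0:Int),(0:Int))).2 then a1 ++ [(PySem.List.pyGetD score 2 ((0:Int),(0:Int))).1] else a1)
  = ([1,2,3] : List Int).filter (fun k => PySem.List.pyGetD [c1,c2,c3] (k - 1) 0 = (PySem.List.max? [c1,c2,c3] (fun x => x)).getD 0) := by
  simp only [sorted3, PySem.List.max?_id_cons, Option.getD_some, List.foldl, filter3]
  have hub : c1 ≤ max (max c1 c2) c3 ∧ c2 ≤ max (max c1 c2) c3 ∧ c3 ≤ max (max c1 c2) c3 :=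
    ⟨le_trans (le_max_left _ _) (le_max_left _ _), le_trans (le_max_right _ _) (le_max_left _ _), le_max_right _ _⟩
  have hmem : max (max c1 c2) c3 = c1 ∨ max (max c1 c2) c3 = c2 ∨ max (max c1 c2) c3 = c3 := by
    rcases max_choice (max c1 c2) c3 with h | h
    · rcases max_choice c1 c2 with h' | h' <;> rw [h, h'] <;> tauto
    · rw [h]; tauto
  generalize hM : max (max c1 c2) c3 = M at hub hmem
  obtain ⟨u1, u2, u3⟩ := hub
  clear hM
  rcases hmem with hm | hm | hm <;> subst hm <;>
    simp only [apply_ite (fun (s : List (Int × Int)) => PySem.List.pyGetD s 0 ((0:Int),(0:Int))),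
      apply_ite (fun (s : List (Int × Int)) => PySem.List.pyGetD s 1 ((0:Int),(0:Int))),
      apply_ite (fun (s : List (Int × Int)) => PySem.List.pyGetD s 2 ((0:Int),(0:Int))),
      get3_0, get3_1, get3_2] <;>
    split_ifs <;> first | rfl | omega

-- the dict component of one of A's loops, after decoupling, counts matches at key k
theorem dictCount (cond : Int → Prop) [DecidablePred cond] (k : Int) :
  ∀ (l : List Int) (d : PySem.Dict Int Int) (j : Int),
    (l.foldl (fun d i => if cond i then PySem.Dict.modify d k 0 (· + 1) else d) d).getD j 0
      = d.getD j 0 + (if j = k then (l.countP (fun i => decide (cond i)) : Int) else 0) := by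
  intro l
  induction l with
  | nil => simp
  | cons x t ih =>
    intro d j
    simp only [List.foldl_cons, List.countP_cons]
    by_cases hc : cond x
    · rw [if_pos hc, ih, PySem.Dict.getD_modify]
      by_cases hj : j = k <;> simp [hj, hc] <;> omega
    · rw [if_neg hc, ih]
      by_cases hj : j = k <;> simp [hj, hc]

theorem dictKeys (cond : Int → Prop) [DecidablePred cond] (k : Int) :
  ∀ (l : List Int) (d : PySem.Dict Int Int), d.contains k = true →
    (l.foldl (fun d i => if cond i then PySem.Dict.modify d k 0 (· + 1) else d) d).keys = d.keys := by
  intro l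
  induction l with
  | nil => intro d _; rfl
  | cons x t ih =>
    intro d hd
    simp only [List.foldl_cons]
    by_cases hc : cond x
    · rw [if_pos hc, ih _ (by simp [PySem.Dict.contains_modify, hd]),
        PySem.Dict.keys_modify, PySem.Dict.keys_insert_of_contains _ _ hd]
    · rw [if_neg hc]; exact ih d hd

-- A's self-extending list: the list stays p repeated periodically, so the loop's dict
-- component only depends on answers[i] vs p[i mod len(p)] — the decoupled fold below.
theorem loopA (answers p : List Int) (k : Int) (hp : 0 < p.length) :
  ∀ (n m : Nat) (s : List Int) (d : PySem.Dict Int Int),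
    s.length = p.length + m →
    (∀ j : Nat, j < s.length → s[j]? = p[j % p.length]?) →
    ((PySem.List.pyRange (m : Int) ((m : Int) + (n : Int)) 1).foldl (solStep answers k) (s, d)).2
      = (PySem.List.pyRange (m : Int) ((m : Int) + (n : Int)) 1).foldl
          (fun d i => if PySem.List.pyGetD answers i 0 = PySem.List.pyGetD p (PySem.Int.mod i (p.length : Int)) 0
                      then PySem.Dict.modify d k 0 (· + 1) else d) d := by
  intro n
  induction n with
  | zero =>
    intro m s d _ _
    rw [PySem.List.pyRange_one_eq_nil (by omega)]
    rfl
  | succ n ih =>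
    intro m s d hlen hper
    have hm_lt : m < s.length := by omega
    have hcons : PySem.List.pyRange (m : Int) ((m : Int) + ((n+1 : Nat) : Int)) 1
        = (m : Int) :: PySem.List.pyRange ((m : Int) + 1) ((m : Int) + ((n+1 : Nat) : Int)) 1 :=
      PySem.List.pyRange_one_cons (by push_cast; omega)
    have hmodlt : m % p.length < p.length := Nat.mod_lt _ hp
    have hsget : PySem.List.pyGetD s (m : Int) 0 = PySem.List.pyGetD p (PySem.Int.mod (m : Int) (p.length : Int)) 0 := by
      rw [PySem.Int.mod_natCast, PySem.List.pyGetD_natCast, PySem.List.pyGetD_natCast,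
        List.getD_eq_getElem?_getD, List.getD_eq_getElem?_getD, hper m hm_lt]
    have hs'get : PySem.List.pyGetD (s ++ [PySem.List.pyGetD s (m : Int) 0]) (m : Int) 0
        = PySem.List.pyGetD s (m : Int) 0 := by
      rw [PySem.List.pyGetD_natCast, PySem.List.pyGetD_natCast,
        List.getD_eq_getElem?_getD, List.getD_eq_getElem?_getD, List.getElem?_append_left hm_lt]
    have hlen' : (s ++ [PySem.List.pyGetD s (m : Int) 0]).length = p.length + (m + 1) := by
      simp [hlen]; omega
    have hper' : ∀ j : Nat, j < (s ++ [PySem.List.pyGetD s (m : Int) 0]).length →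
        (s ++ [PySem.List.pyGetD s (m : Int) 0])[j]? = p[j % p.length]? := by
      intro j hj
      rcases lt_or_eq_of_le (Nat.lt_succ_iff.mp (by simpa using hj)) with hlt | heq
      · rw [List.getElem?_append_left hlt]; exact hper j hlt
      · subst heq
        rw [List.getElem?_concat_length]
        have hx : PySem.List.pyGetD s (m : Int) 0 = p[m % p.length] := by
          rw [PySem.List.pyGetD_natCast, List.getD_eq_getElem?_getD, hper m hm_lt,
            List.getElem?_eq_getElem hmodlt]; rfl
        rw [hx, hlen, Nat.add_mod_left, List.getElem?_eq_getElem hmodlt]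
    have hcast1 : ((m : Int) + 1) = ((m + 1 : Nat) : Int) := by push_cast; ring
    have hcast2 : ((m : Int) + ((n + 1 : Nat) : Int)) = (((m + 1 : Nat) : Int) + (n : Int)) := by push_cast; ring
    rw [hcons]
    simp only [List.foldl_cons]
    by_cases hc : PySem.List.pyGetD answers (m : Int) 0 = PySem.List.pyGetD p (PySem.Int.mod (m : Int) (p.length : Int)) 0
    · rw [if_pos hc]
      have hstep : solStep answers k (s, d) (m : Int)
          = (s ++ [PySem.List.pyGetD s (m : Int) 0], d.modify k 0 (· + 1)) := by
        simp only [solStep]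
        rw [if_pos (by rw [hs'get, hsget]; exact hc)]
      rw [hstep, hcast1, hcast2]
      exact ih (m + 1) _ _ hlen' hper'
    · rw [if_neg hc]
      have hstep : solStep answers k (s, d) (m : Int)
          = (s ++ [PySem.List.pyGetD s (m : Int) 0], d) := by
        simp only [solStep]
        rw [if_neg (by rw [hs'get, hsget]; exact hc)]
      rw [hstep, hcast1, hcast2]
      exact ih (m + 1) _ _ hlen' hper'

theorem loop_top (answers p : List Int) (k : Int) (hp : 0 < p.length) (d : PySem.Dict Int Int) :
  ((PySem.List.pyRange 0 (answers.length : Int) 1).foldl (solStep answers k) (p, d)).2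
    = (PySem.List.pyRange 0 (answers.length : Int) 1).foldl
        (fun d i => if PySem.List.pyGetD answers i 0 = PySem.List.pyGetD p (PySem.Int.mod i (p.length : Int)) 0
                    then PySem.Dict.modify d k 0 (· + 1) else d) d := by
  have h := loopA answers p k hp answers.length 0 p d (by omega)
    (fun j hj => by rw [Nat.mod_eq_of_lt hj])
  simpa using h

-- the three-loop dict, decoupled, yields exactly the three match counts as items
theorem dict3_items (cond1 cond2 cond3 : Int → Prop)
    [DecidablePred cond1] [DecidablePred cond2] [DecidablePred cond3] (r : List Int) :
  (r.foldl (fun d i => if cond3 i then PySem.Dict.modify d 3 0 (· + 1) else d)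
    (r.foldl (fun d i => if cond2 i then PySem.Dict.modify d 2 0 (· + 1) else d)
      (r.foldl (fun d i => if cond1 i then PySem.Dict.modify d 1 0 (· + 1) else d)
        (PySem.Dict.ofList [(1, 0), (2, 0), (3, 0)] : PySem.Dict Int Int)))).items
    = [(1, (r.countP (fun i => decide (cond1 i)) : Int)),
       (2, (r.countP (fun i => decide (cond2 i)) : Int)),
       (3, (r.countP (fun i => decide (cond3 i)) : Int))] := by
  set d0 : PySem.Dict Int Int := PySem.Dict.ofList [(1, 0), (2, 0), (3, 0)] with hd0
  set d1 := r.foldl (fun d i => if cond1 i then PySem.Dict.modify d 1 0 (· + 1) else d) d0 with hd1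
  set d2 := r.foldl (fun d i => if cond2 i then PySem.Dict.modify d 2 0 (· + 1) else d) d1 with hd2
  set d3 := r.foldl (fun d i => if cond3 i then PySem.Dict.modify d 3 0 (· + 1) else d) d2 with hd3
  have hkeys0 : d0.keys = [1, 2, 3] := by decide
  have hk1 : d1.keys = d0.keys := dictKeys cond1 1 r d0 (by decide)
  have hk2 : d2.keys = d1.keys := dictKeys cond2 2 r d1 (by
    rw [PySem.Dict.contains_eq_decide_mem_keys, hk1, hkeys0]; decide)
  have hk3 : d3.keys = d2.keys := dictKeys cond3 3 r d2 (by
    rw [PySem.Dict.contains_eq_decide_mem_keys, hk2, hk1, hkeys0]; decide)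
  have hg1 : d3.getD 1 0 = (r.countP (fun i => decide (cond1 i)) : Int) := by
    rw [hd3, dictCount cond3 3 r d2 1, hd2, dictCount cond2 2 r d1 1, hd1, dictCount cond1 1 r d0 1]
    norm_num
    rfl
  have hg2 : d3.getD 2 0 = (r.countP (fun i => decide (cond2 i)) : Int) := by
    rw [hd3, dictCount cond3 3 r d2 2, hd2, dictCount cond2 2 r d1 2, hd1, dictCount cond1 1 r d0 2]
    norm_num
    rfl
  have hg3 : d3.getD 3 0 = (r.countP (fun i => decide (cond3 i)) : Int) := by
    rw [hd3, dictCount cond3 3 r d2 3, hd2, dictCount cond2 2 r d1 3, hd1, dictCount cond1 1 r d0 3]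
    norm_num
    rfl
  rw [PySem.Dict.items_eq_map_keys d3 (by rw [hk3, hk2, hk1, hkeys0]; decide) 0,
    hk3, hk2, hk1, hkeys0]
  simp only [List.map_cons, List.map_nil, hg1, hg2, hg3]

-- ===== B-side lemmas: the residue histograms count the matches =====

-- the score B reads off the buckets for pattern p, as a sum over the 40 residues
def S (p : List Int) (bs : List (PySem.Dict Int Int)) : Int :=
  ((List.range 40).map (fun r =>
    (bs.getD r PySem.Dict.empty).getD (PySem.List.pyGetD p ((r % p.length : Nat) : Int) 0) 0)).sum

-- B's score fold over pyRange 0 40 IS S of the bucket list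
theorem scoreOf_eq_S (p : List Int) (bs : List (PySem.Dict Int Int)) :
  (PySem.List.pyRange 0 40 1).foldl
      (fun s r => s + (PySem.List.pyGetD bs r PySem.Dict.empty).getD
          (PySem.List.pyGetD p (PySem.Int.mod r (p.length : Int)) 0) 0) (0 : Int)
    = S p bs := by
  rw [PySem.List.foldl_add, S]
  have h40 : (40 : Int) = ((40 : Nat) : Int) := by norm_num
  rw [h40, PySem.List.pyRange_zero_natCast, List.map_map, zero_add]
  refine congrArg _ (List.map_congr_left (fun r _ => ?_))
  simp [PySem.Int.mod_natCast, PySem.List.pyGetD_natCast]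

-- replacing bucket r0 changes S by the new value minus the old one at that residue's key
theorem S_set (p : List Int) (bs : List (PySem.Dict Int Int)) (hlen : bs.length = 40)
    (r0 : Nat) (h : r0 < 40) (d' : PySem.Dict Int Int) :
  S p (bs.set r0 d')
    = S p bs + d'.getD (PySem.List.pyGetD p ((r0 % p.length : Nat) : Int) 0) 0
      - (bs.getD r0 PySem.Dict.empty).getD (PySem.List.pyGetD p ((r0 % p.length : Nat) : Int) 0) 0 := by
  have hset : (List.range 40).map (fun r =>
      ((bs.set r0 d').getD r PySem.Dict.empty).getD (PySem.List.pyGetD p ((r % p.length : Nat) : Int) 0) 0)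
      = ((List.range 40).map (fun r =>
      (bs.getD r PySem.Dict.empty).getD (PySem.List.pyGetD p ((r % p.length : Nat) : Int) 0) 0)).set r0
        (d'.getD (PySem.List.pyGetD p ((r0 % p.length : Nat) : Int) 0) 0) := by
    apply List.ext_getElem
    · simp
    · intro i hi hi'
      simp only [List.length_map, List.length_range] at hi
      rw [List.getElem_map, List.getElem_range, List.getElem_set]
      by_cases hir : r0 = i
      · subst hir
        rw [if_pos rfl]
        have : (bs.set r0 d').getD r0 PySem.Dict.empty = d' := by
          rw [List.getD_eq_getElem?_getD, List.getElem?_set_self (by omega)]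
          rfl
        rw [this]
      · rw [if_neg hir]
        rw [List.getElem_map, List.getElem_range]
        have : (bs.set r0 d').getD i PySem.Dict.empty = bs.getD i PySem.Dict.empty := by
          rw [List.getD_eq_getElem?_getD, List.getD_eq_getElem?_getD, List.getElem?_set_ne hir]
        rw [this]
  rw [S, S, hset]
  set L := (List.range 40).map (fun r =>
      (bs.getD r PySem.Dict.empty).getD (PySem.List.pyGetD p ((r % p.length : Nat) : Int) 0) 0) with hL
  have hLlen : L.length = 40 := by simp [hL]
  have hgetL : L[r0]'(by omega) = (bs.getD r0 PySem.Dict.empty).getD (PySem.List.pyGetD p ((r0 % p.length : Nat) : Int) 0) 0 := by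
    simp [hL]
  rw [List.sum_set, if_pos (by omega)]
  have hsplit : L.sum = (L.take r0).sum + L[r0]'(by omega) + (L.drop (r0 + 1)).sum := by
    conv_lhs => rw [← List.take_append_drop r0 L]
    rw [List.sum_append, List.drop_eq_getElem_cons (by omega), List.sum_cons]
    ring
  rw [hsplit, hgetL]
  ring

-- one bump at index i adds 1 to S exactly when the value matches p at i mod len(p)
theorem S_bump (p : List Int) (hdvd : p.length ∣ 40) (i : Nat) (a : Int)
    (bs : List (PySem.Dict Int Int)) (hlen : bs.length = 40) :
  S p (bump bs ((i : Int), a))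
    = S p bs + (if a = PySem.List.pyGetD p ((i % p.length : Nat) : Int) 0 then 1 else 0) := by
  have h40 : (40 : Int) = ((40 : Nat) : Int) := by norm_num
  have hr : (PySem.Int.mod (i : Int) 40).toNat = i % 40 := by
    rw [h40, PySem.Int.mod_natCast]; omega
  have hrlt : i % 40 < 40 := Nat.mod_lt _ (by norm_num)
  have hkey : (i % 40) % p.length = i % p.length := Nat.mod_mod_of_dvd i hdvd
  simp only [bump, hr]
  rw [S_set p bs hlen (i % 40) hrlt, hkey, PySem.Dict.getD_modify]
  by_cases hc : a = PySem.List.pyGetD p ((i % p.length : Nat) : Int) 0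
  · rw [if_pos hc, if_pos hc.symm, hc]; ring
  · rw [if_neg hc, if_neg (fun h => hc h.symm)]; ring

-- folding bumps over any list of indices adds the match count to S
theorem S_foldl (p : List Int) (hdvd : p.length ∣ 40) (v : Nat → Int) :
  ∀ (l : List Nat) (bs : List (PySem.Dict Int Int)), bs.length = 40 →
  S p (l.foldl (fun bs (k : Nat) => bump bs ((k : Int), v k)) bs)
    = S p bs + ((l.countP (fun k => decide (v k = PySem.List.pyGetD p ((k % p.length : Nat) : Int) 0))) : Int) := by
  intro l
  induction l with
  | nil => intro bs _; simp
  | cons x t ih =>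
    intro bs hlen
    have hlen' : (bump bs ((x : Int), v x)).length = 40 := by
      simp only [bump]; rw [List.length_set]; exact hlen
    rw [List.foldl_cons, ih _ hlen', S_bump p hdvd x (v x) bs hlen, List.countP_cons]
    by_cases hc : v x = PySem.List.pyGetD p ((x % p.length : Nat) : Int) 0 <;>
      simp [hc] <;> omega

-- S of the empty histograms is 0
theorem S_init (p : List Int) :
  S p (List.replicate 40 (PySem.Dict.empty : PySem.Dict Int Int)) = 0 := by
  rw [S]
  have : ∀ r ∈ List.range 40,
      ((List.replicate 40 (PySem.Dict.empty : PySem.Dict Int Int)).getD r PySem.Dict.empty).getD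
        (PySem.List.pyGetD p ((r % p.length : Nat) : Int) 0) 0 = 0 := by
    intro r hr
    rw [List.getD_eq_getElem?_getD, List.getElem?_replicate]
    simp [List.mem_range] at hr
    rw [if_pos hr]
    rfl
  rw [List.map_congr_left this]
  simp

-- B's whole bucket pipeline yields exactly the match count of pattern p
theorem score_eq_count (answers p : List Int) (hdvd : p.length ∣ 40) :
  (PySem.List.pyRange 0 40 1).foldl
      (fun s r => s + (PySem.List.pyGetD
          ((PySem.List.enumerate answers).foldl bump
            (List.replicate 40 (PySem.Dict.empty : PySem.Dict Int Int))) r PySem.Dict.empty).getD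
          (PySem.List.pyGetD p (PySem.Int.mod r (p.length : Int)) 0) 0) (0 : Int)
    = ((PySem.List.pyRange 0 (answers.length : Int) 1).countP
        (fun i => decide (PySem.List.pyGetD answers i 0 = PySem.List.pyGetD p (PySem.Int.mod i (p.length : Int)) 0)) : Int) := by
  rw [scoreOf_eq_S]
  have hen : PySem.List.enumerate answers
      = (PySem.List.pyRange 0 (answers.length : Int) 1).map (fun j => (j, PySem.List.pyGetD answers j 0)) := by
    rw [PySem.List.enumerate_eq_map_pyRange answers 0]
    rfl
  rw [hen, List.foldl_map, PySem.List.pyRange_zero_natCast, List.foldl_map,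
    S_foldl p hdvd (fun k => PySem.List.pyGetD answers (k : Int) 0) (List.range answers.length)
      _ (by simp), S_init, List.countP_map, zero_add]
  refine congrArg _ (List.countP_congr (fun k _ => ?_))
  simp only [Function.comp_apply, PySem.Int.mod_natCast]

-- ===== VERDICT (by name: the statement is the Claim_ definition above) =====
theorem solution_spec : Claim_equal_solution := by
  intro answers _
  unfold Spec_solution
  simp only [solution, solution_alt]
  rw [loop_top answers [1, 2, 3, 4, 5] 1 (by norm_num),
    loop_top answers [2, 1, 2, 3, 2, 4, 2, 5] 2 (by norm_num),
    loop_top answers [3, 3, 1, 1, 2, 2, 4, 4, 5, 5] 3 (by norm_num),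
    dict3_items
      (fun i => PySem.List.pyGetD answers i 0 = PySem.List.pyGetD [1, 2, 3, 4, 5] (PySem.Int.mod i (([1, 2, 3, 4, 5] : List Int).length : Int)) 0)
      (fun i => PySem.List.pyGetD answers i 0 = PySem.List.pyGetD [2, 1, 2, 3, 2, 4, 2, 5] (PySem.Int.mod i (([2, 1, 2, 3, 2, 4, 2, 5] : List Int).length : Int)) 0)
      (fun i => PySem.List.pyGetD answers i 0 = PySem.List.pyGetD [3, 3, 1, 1, 2, 2, 4, 4, 5, 5] (PySem.Int.mod i (([3, 3, 1, 1, 2, 2, 4, 4, 5, 5] : List Int).length : Int)) 0)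
      (PySem.List.pyRange 0 (answers.length : Int) 1)]
  simp only [List.map_cons, List.map_nil]
  simp only [score_eq_count answers [1, 2, 3, 4, 5] (by decide),
    score_eq_count answers [2, 1, 2, 3, 2, 4, 2, 5] (by decide),
    score_eq_count answers [3, 3, 1, 1, 2, 2, 4, 4, 5, 5] (by decide)]
  exact tail_eq _ _ _
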